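-- pv_equiv track=rewrite | github.com/programmeruser2/ctf-solutions | patriotctf/2023/python_garbage.py | finalstage_inv
-- ===== SOURCE A (Python) =====
-- def finalstage_inv(w):
--     res = ''
--     h = 0
--     while h < len(w):
--         try:
--             res += w[h+1] + w[h]
--         except:
--             res += w[h]
--         h += 2
--     w = list(res)
--     w.reverse()
--     return ''.join(w)
-- ===== SOURCE B (Python) =====
-- def finalstage_inv(w):
--     chunks = [w[i:i+2] for i in range(0, len(w), 2)]
--     return ''.join(reversed(chunks))
-- ===== Notes on version B (the rewrite author's own statement) =====
-- stated objective: faster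
-- what changed: Instead of swapping each adjacent pair with try/except indexing into a growing string and then reversing the whole result, B splits the string into 2-character slices and str.join's the chunks in reversed order, with no per-character swapping and no final reversal.
import Mathlib
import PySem

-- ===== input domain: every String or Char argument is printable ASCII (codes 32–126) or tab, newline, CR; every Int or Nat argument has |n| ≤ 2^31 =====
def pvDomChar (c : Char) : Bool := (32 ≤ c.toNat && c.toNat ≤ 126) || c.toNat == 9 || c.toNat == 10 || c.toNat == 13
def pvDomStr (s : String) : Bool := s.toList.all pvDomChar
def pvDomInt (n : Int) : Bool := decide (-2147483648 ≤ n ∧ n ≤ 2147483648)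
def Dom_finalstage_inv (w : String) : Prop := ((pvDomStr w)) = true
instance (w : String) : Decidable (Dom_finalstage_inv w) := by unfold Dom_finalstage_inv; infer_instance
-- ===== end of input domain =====

-- B replaces A's try/except pair-swapping index loop followed by a whole-string reversal with
-- joining the 2-character slices of w in reversed chunk order (objective: faster, measured).

-- ===== PORT A =====
-- A's while loop: h steps by 2; w[h+1] may raise IndexError (pyGet? = none), w[h] is in range
def faLoop (cs : List Char) (h : Nat) (res : List Char) : List Char :=
  if hlt : h < cs.length then
    match PySem.List.pyGet? cs ((h : Int) + 1) with
    | some c2 => faLoop cs (h + 2) (res ++ [c2, cs[h]])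
    | none => faLoop cs (h + 2) (res ++ [cs[h]])
  else res
termination_by cs.length - h

def finalstage_inv (w : String) : String :=
  let res := faLoop w.toList 0 []
  -- w = list(res); w.reverse(); return ''.join(w)
  String.ofList res.reverse

-- ===== PORT B =====
def finalstage_inv_alt (w : String) : String :=
  let chunks := (PySem.List.pyRange 0 (PySem.Str.len w) 2).map
    (fun i => PySem.Str.slice w (some i) (some (i + 2)))
  PySem.Str.join "" chunks.reverse

-- ===== PRECONDITION & SPEC =====
def Spec_finalstage_inv (w : String) (out : String) : Prop := out = finalstage_inv_alt w
instance (w : String) (out : String) : Decidable (Spec_finalstage_inv w out) := by unfold Spec_finalstage_inv; infer_instance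

-- ===== CLAIM (what is proved, stated in full; the proofs are below) =====
def Claim_equal_finalstage_inv : Prop := ∀ (w : String), Dom_finalstage_inv w → Spec_finalstage_inv w (finalstage_inv w)

-- ===== LEMMAS AND PROOFS =====

/-- the swap-adjacent-pairs map: the value A's loop accumulates in `res` -/
def pairSwap : List Char → List Char
  | [] => []
  | [c] => [c]
  | c1 :: c2 :: t => c2 :: c1 :: pairSwap t

/-- B's chunk list, expressed on `List Char` -/
def chunksL (l : List Char) : List (List Char) :=
  (PySem.List.pyRange 0 l.length 2).map (fun i => PySem.List.slice l (some i) (some (i + 2)))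

theorem faLoop_eq (cs : List Char) (h : Nat) (res : List Char) :
    faLoop cs h res = res ++ pairSwap (cs.drop h) := by
  induction h, res using faLoop.induct cs with
  | case1 h res hlt c2 hget ih =>
    rw [faLoop]
    simp only [hlt, dif_pos, hget, ih]
    rw [show ((h : Int) + 1) = ((h + 1 : Nat) : Int) by push_cast; ring,
      PySem.List.pyGet?_natCast] at hget
    have h1 : h + 1 < cs.length := by
      by_contra hc
      rw [List.getElem?_eq_none (by omega)] at hget
      simp at hget
    rw [List.getElem?_eq_getElem h1] at hget
    have hc2 : c2 = cs[h+1] := (Option.some.inj hget).symm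
    have hdrop : cs.drop h = cs[h] :: cs[h+1] :: cs.drop (h + 2) := by
      rw [List.drop_eq_getElem_cons hlt, List.drop_eq_getElem_cons h1]
    rw [hdrop, pairSwap, hc2]
    simp
  | case2 h res hlt hget ih =>
    rw [faLoop]
    simp only [hlt, dif_pos, hget, ih]
    rw [show ((h : Int) + 1) = ((h + 1 : Nat) : Int) by push_cast; ring,
      PySem.List.pyGet?_natCast] at hget
    have h1 : ¬ (h + 1 < cs.length) := by
      by_contra hc
      rw [List.getElem?_eq_getElem hc] at hget
      simp at hget
    have hd2 : cs.drop (h + 2) = [] := List.drop_eq_nil_of_le (by omega)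
    have hdrop : cs.drop h = [cs[h]] := by
      rw [List.drop_eq_getElem_cons hlt, List.drop_eq_nil_of_le (show cs.length ≤ h + 1 by omega)]
    rw [hdrop, hd2]
    simp [pairSwap]
  | case3 h res hlt =>
    rw [faLoop]
    simp only [hlt]
    rw [List.drop_eq_nil_of_le (by omega), pairSwap]
    simp

theorem pyRange_two (n : Nat) :
    PySem.List.pyRange 0 n 2 = (List.range (((n : Int) + 1) / 2).toNat).map (fun k : Nat => 2 * (k : Int)) := by
  rw [PySem.List.pyRange_of_pos 0 n (by norm_num)]
  have hc : (if (0:Int) < n then (((n:Int) - 0 + 2 - 1)/2).toNat else 0) = (((n:Int)+1)/2).toNat := by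
    split_ifs with h
    · congr 1; omega
    · omega
  rw [hc]
  exact List.map_congr_left (fun k _ => by ring)

theorem chunksL_nil : chunksL [] = [] := by
  simp [chunksL]
  decide

theorem chunksL_one (c : Char) : chunksL [c] = [[c]] := by
  simp only [chunksL, List.length_cons, List.length_nil]
  rw [pyRange_two 1]
  norm_num
  rw [PySem.List.slice_to _ (by norm_num)]
  rfl

theorem chunksL_cons (c1 c2 : Char) (t : List Char) :
    chunksL (c1 :: c2 :: t) = [c1, c2] :: chunksL t := by
  simp only [chunksL, pyRange_two, List.length_cons]
  have hcnt : ((((t.length + 1 + 1 : Nat) : Int) + 1) / 2).toNat = (((t.length : Int) + 1) / 2).toNat + 1 := by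
    omega
  rw [hcnt, List.range_succ_eq_map]
  simp only [List.map_cons, List.map_map]
  congr 1
  norm_num
  intro a ha
  have e1 : (2:Int) * ((a:Int)+1) = ((2*a+2 : Nat) : Int) := by push_cast; ring
  have e2 : ((2*a+2 : Nat) : Int) + 2 = ((2*a+4 : Nat) : Int) := by push_cast; ring
  have e3 : (2:Int) * ((a:Int)) = ((2*a : Nat) : Int) := by push_cast; ring
  have e4 : ((2*a : Nat) : Int) + 2 = ((2*a+2 : Nat) : Int) := by push_cast; ring
  rw [e1, e2, PySem.List.slice_natCast, e3, e4, PySem.List.slice_natCast]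
  have h5 : (2*a+2 : Nat) = (2*a) + 1 + 1 := by omega
  rw [h5]
  simp only [List.drop_succ_cons]
  congr 1
  omega

theorem join_empty_flatten (css : List (List Char)) :
    PySem.Chars.join [] css = css.flatten := by
  induction css with
  | nil => rw [PySem.Chars.join_nil]; rfl
  | cons p t ih =>
    cases t with
    | nil => rw [PySem.Chars.join_singleton]; simp
    | cons q r =>
      rw [PySem.Chars.join_cons_cons, ih]
      simp

theorem chunks_flatten (l : List Char) :
    (chunksL l).reverse.flatten = (pairSwap l).reverse := by
  induction l using pairSwap.induct with
  | case1 => rw [chunksL_nil, pairSwap]; rfl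
  | case2 c => rw [chunksL_one, pairSwap]; rfl
  | case3 c1 c2 t ih =>
    rw [chunksL_cons, pairSwap]
    simp only [List.reverse_cons, List.flatten_append, ih]
    simp

-- ===== VERDICT (by name: the statement is the Claim_ definition above) =====
theorem finalstage_inv_spec : Claim_equal_finalstage_inv := by
  intro w _
  show finalstage_inv w = finalstage_inv_alt w
  unfold finalstage_inv finalstage_inv_alt
  rw [faLoop_eq]
  simp only [List.drop_zero, List.nil_append]
  rw [PySem.Str.join]
  have hmap : List.map String.toList
      (((PySem.List.pyRange 0 (PySem.Str.len w) 2).map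
        (fun i => PySem.Str.slice w (some i) (some (i + 2)))).reverse)
      = (chunksL w.toList).reverse := by
    rw [List.map_reverse, List.map_map]
    unfold chunksL
    rw [PySem.Str.len]
    congr 1
    apply List.map_congr_left
    intro i _
    simp only [Function.comp_apply, PySem.Str.toList_slice]
    rfl
  rw [hmap]
  have hsep : ("" : String).toList = [] := rfl
  rw [hsep, join_empty_flatten, chunks_flatten]
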